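-- pv_equiv track=rewrite | github.com/swalterfub/amesgcm | bin/MarsPlot.py | get_list_varfull
-- ===== SOURCE A (Python) =====
-- def get_list_varfull(raw_input):
--     '''
--     Given an expression object with '[]' return the different variable needed
--     Args:
--         raw_input: a complex varfull object, for example '2*[atmos_average.temp]+[atmos_average2.ucomp]*1000'
--     Returns:
--         var_list  a list of variable to load, e.g ['atmos_average.temp', 'atmos_average2.ucomp']
--
--     '''
--     var_list=[]
--     record = False
--     current_name=''
--     for i in range(0,len(raw_input)):
--         if raw_input[i]==']':
--             record=False
--             var_list.append(current_name.strip())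
--             current_name=''
--         if record: current_name+=raw_input[i]
--         if raw_input[i]=='[': record=True
--     return var_list
-- ===== SOURCE B (Python) =====
-- def _bracket_name(seg):
--     i = seg.find('[')
--     return '' if i == -1 else seg[i+1:].strip()
--
-- def get_list_varfull(raw_input):
--     parts = raw_input.split(']')
--     return [_bracket_name(seg) for seg in parts[:-1]]
-- ===== Notes on version B (the rewrite author's own statement) =====
-- stated objective: faster
-- what changed: Replaced the per-character record-flag state machine with a split on the closing bracket: for each segment except the last, take the text after its first opening bracket (empty string when none), stripped.
import Mathlib
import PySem

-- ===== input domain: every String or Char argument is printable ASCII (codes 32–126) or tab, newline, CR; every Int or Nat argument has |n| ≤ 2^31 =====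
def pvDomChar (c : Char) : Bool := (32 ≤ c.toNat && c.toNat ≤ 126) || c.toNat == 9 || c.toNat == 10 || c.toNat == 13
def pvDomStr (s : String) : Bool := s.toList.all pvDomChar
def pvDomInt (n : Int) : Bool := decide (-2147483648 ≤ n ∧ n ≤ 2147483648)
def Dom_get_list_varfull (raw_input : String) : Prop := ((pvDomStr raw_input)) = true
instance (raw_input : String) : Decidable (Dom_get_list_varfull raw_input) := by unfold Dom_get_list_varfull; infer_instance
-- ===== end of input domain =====

-- B replaces A's per-character record-flag state machine by a split-on-closing-bracket decomposition (measured faster in a timing run); return values proved equal on all inputs.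

-- ===== PORT A =====
-- one loop iteration of A: the three successive 'if's on character c, over state (var_list, record, current_name)
def pvStepA (st : List String × Bool × List Char) (c : Char) : List String × Bool × List Char :=
  let (var_list, record, current_name) := st
  let (var_list, record, current_name) :=
    if c = ']' then (var_list ++ [String.ofList (PySem.Chars.strip current_name)], false, ([] : List Char))
    else (var_list, record, current_name)
  let current_name := if record then current_name ++ [c] else current_name
  let record := if c = '[' then true else record
  (var_list, record, current_name)

def get_list_varfull (raw_input : String) : List String :=
  (raw_input.toList.foldl pvStepA ([], false, [])).1

-- ===== PORT B =====
-- helper _bracket_name: text after the segment's first '[', stripped; '' when no '['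
def pvBracketName (seg : List Char) : String :=
  let i := PySem.Chars.find seg ['[']
  if i = -1 then "" else String.ofList (PySem.Chars.strip (PySem.Chars.slice seg (some (i + 1)) none))

def get_list_varfull_alt (raw_input : String) : List String :=
  (PySem.List.slice (PySem.Chars.splitOn raw_input.toList [']']) none (some (-1))).map pvBracketName

-- ===== PRECONDITION & SPEC =====
def Spec_get_list_varfull (raw_input : String) (out : List String) : Prop := out = get_list_varfull_alt raw_input
instance (raw_input : String) (out : List String) : Decidable (Spec_get_list_varfull raw_input out) := by unfold Spec_get_list_varfull; infer_instance

-- ===== CLAIM (what is proved, stated in full; the proofs are below) =====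
def Claim_equal_get_list_varfull : Prop := ∀ (raw_input : String), Dom_get_list_varfull raw_input → Spec_get_list_varfull raw_input (get_list_varfull raw_input)

-- ===== LEMMAS AND PROOFS =====

-- reference split on a single separator character
def pvSplit (x : Char) : List Char → List (List Char)
  | [] => [[]]
  | c :: rest =>
    match pvSplit x rest with
    | [] => []        -- unreachable
    | h :: t => if c = x then [] :: h :: t else (c :: h) :: t

-- prepend to the first piece
def pvConsFst (p : List Char) : List (List Char) → List (List Char)
  | [] => [p]
  | h :: t => (p ++ h) :: t

-- suffix after first occurrence of x ([] when absent)
def pvAfter (x : Char) : List Char → List Char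
  | [] => []
  | c :: rest => if c = x then rest else pvAfter x rest

-- index of first occurrence of x (length when absent)
def pvIdx (x : Char) : List Char → Nat
  | [] => 0
  | c :: rest => if c = x then 0 else pvIdx x rest + 1

def pvFA (seg : List Char) : String :=
  if '[' ∈ seg then String.ofList (PySem.Chars.strip (pvAfter '[' seg)) else ""

def pvBcore (cs : List Char) : List String := ((pvSplit ']' cs).dropLast).map pvFA

theorem pvSplit_ne_nil (x : Char) (cs : List Char) : pvSplit x cs ≠ [] := by
  induction cs with
  | nil => simp [pvSplit]
  | cons c rest ih =>
    cases h : pvSplit x rest with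
    | nil => exact absurd h ih
    | cons a t =>
      simp only [pvSplit, h]
      split <;> simp

theorem pvSplit_go (x : Char) :
    ∀ (fuel : Nat) (l cur : List Char) (acc : List (List Char)), l.length < fuel →
      PySem.Chars.splitOn.go [x] fuel l cur acc = acc.reverse ++ pvConsFst cur.reverse (pvSplit x l) := by
  intro fuel
  induction fuel with
  | zero => intro l cur acc h; omega
  | succ n ih =>
    intro l cur acc h
    cases l with
    | nil => simp [PySem.Chars.splitOn.go, pvSplit, pvConsFst]
    | cons c rest =>
      simp only [PySem.Chars.splitOn.go]
      by_cases hc : c = x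
      · have hp : List.isPrefixOf [x] (c :: rest) = true := by simp [List.isPrefixOf, hc]
        simp only [hp, if_true, List.length_cons, List.length_nil, Nat.zero_add, List.drop_succ_cons, List.drop_zero]
        rw [ih rest [] (cur.reverse :: acc) (by simpa using Nat.lt_of_succ_lt_succ h)]
        simp only [pvSplit, hc]
        cases hs : pvSplit x rest with
        | nil => exact absurd hs (pvSplit_ne_nil x rest)
        | cons a t => simp [pvConsFst]
      · have hp : List.isPrefixOf [x] (c :: rest) = false := by
          simp only [List.isPrefixOf, Bool.and_true]
          simp only [Bool.eq_false_iff, ne_eq, beq_iff_eq]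
          intro h'; exact hc h'.symm
        simp only [hp, Bool.false_eq_true, if_false]
        rw [ih rest (c :: cur) acc (by simpa using Nat.lt_of_succ_lt_succ h)]
        simp only [pvSplit]
        cases hs : pvSplit x rest with
        | nil => exact absurd hs (pvSplit_ne_nil x rest)
        | cons a t => simp [pvConsFst, hc]

theorem pvSplitOn_single (x : Char) (cs : List Char) :
    PySem.Chars.splitOn cs [x] = pvSplit x cs := by
  have := pvSplit_go x (cs.length + 1) cs [] [] (by omega)
  simp only [PySem.Chars.splitOn, this, List.reverse_nil, List.nil_append]
  cases hs : pvSplit x cs with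
  | nil => exact absurd hs (pvSplit_ne_nil x cs)
  | cons a t => simp [pvConsFst]

theorem pvFind_go_single (x : Char) :
    ∀ (seg : List Char) (k : Nat),
      PySem.Chars.find.go [x] seg k = if x ∈ seg then ((k + pvIdx x seg : Nat) : Int) else -1 := by
  intro seg
  induction seg with
  | nil => intro k; simp [PySem.Chars.find.go, List.isEmpty]
  | cons c rest ih =>
    intro k
    simp only [PySem.Chars.find.go]
    by_cases hc : c = x
    · have hp : List.isPrefixOf [x] (c :: rest) = true := by simp [List.isPrefixOf, hc]
      rw [hp]
      simp [pvIdx, hc, List.mem_cons]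
    · have hp : List.isPrefixOf [x] (c :: rest) = false := by
        simp only [List.isPrefixOf, Bool.and_true]
        simp only [Bool.eq_false_iff, ne_eq, beq_iff_eq]
        intro h'; exact hc h'.symm
      rw [hp]
      simp only [Bool.false_eq_true, if_false, ih (k + 1)]
      by_cases hr : x ∈ rest
      · have hm : x ∈ c :: rest := List.mem_cons_of_mem _ hr
        rw [if_pos hr, if_pos hm]
        simp only [pvIdx, if_neg hc]
        push_cast; ring
      · have hm : x ∉ c :: rest := by
          intro h'
          cases h' with
          | head => exact hc rfl
          | tail _ h'' => exact hr h''
        rw [if_neg hr, if_neg hm]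

theorem pvDrop_idx (x : Char) (seg : List Char) :
    seg.drop (pvIdx x seg + 1) = pvAfter x seg := by
  induction seg with
  | nil => simp [pvIdx, pvAfter]
  | cons c rest ih =>
    by_cases hc : c = x <;> simp [pvIdx, pvAfter, hc, ih]

theorem pvBracketName_eq (seg : List Char) : pvBracketName seg = pvFA seg := by
  unfold pvBracketName pvFA
  have hfind : PySem.Chars.find seg ['['] = if '[' ∈ seg then ((pvIdx '[' seg : Nat) : Int) else -1 := by
    simpa using pvFind_go_single '[' seg 0
  by_cases hm : '[' ∈ seg
  · rw [hfind, if_pos hm, if_neg (by omega)]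
    · have h1 : ((pvIdx '[' seg : Nat) : Int) + 1 = ((pvIdx '[' seg + 1 : Nat) : Int) := by push_cast; ring
      rw [h1]
      rw [show PySem.Chars.slice seg (some ((pvIdx '[' seg + 1 : Nat) : Int)) none = PySem.List.slice seg (some ((pvIdx '[' seg + 1 : Nat) : Int)) none from by simp [pysem]]
      rw [PySem.List.slice_from_natCast, pvDrop_idx, if_pos hm]
  · rw [hfind, if_neg hm, if_pos rfl, if_neg hm]

theorem pvAlt_eq_core (s : String) : get_list_varfull_alt s = pvBcore s.toList := by
  unfold get_list_varfull_alt pvBcore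
  rw [pvSplitOn_single, PySem.List.slice_to_neg_one]
  exact List.map_congr_left (fun seg _ => pvBracketName_eq seg)

theorem pvConsFst_split (x : Char) (pre cs : List Char) (h : x ∉ pre) :
    pvSplit x (pre ++ cs) = pvConsFst pre (pvSplit x cs) := by
  induction pre with
  | nil =>
    cases hs : pvSplit x cs with
    | nil => exact absurd hs (pvSplit_ne_nil x cs)
    | cons a t => rw [List.nil_append, hs]; simp [pvConsFst]
  | cons c p ih =>
    have hc : c ≠ x := fun hcx => h (by simp [hcx])
    have hp : x ∉ p := fun hxp => h (by simp [hxp])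
    simp only [List.cons_append, pvSplit, ih hp]
    cases hs : pvSplit x cs with
    | nil => exact absurd hs (pvSplit_ne_nil x cs)
    | cons a t => cases hpre : pvConsFst p (a :: t) with
      | nil => simp [pvConsFst] at hpre
      | cons b u =>
        simp only [pvConsFst] at hpre ⊢
        cases hpre
        simp [hc]

theorem pvAfter_append_mem (x : Char) (pre : List Char) (c : Char) (h : x ∈ pre) :
    pvAfter x (pre ++ [c]) = pvAfter x pre ++ [c] := by
  induction pre with
  | nil => simp at h
  | cons a p ih =>
    by_cases ha : a = x
    · simp [pvAfter, ha]
    · have : x ∈ p := by cases h with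
        | head => exact absurd rfl ha
        | tail _ h' => exact h'
      simp [pvAfter, ha, ih this]

theorem pvAfter_not_mem (x : Char) (l : List Char) (h : x ∉ l) : pvAfter x l = [] := by
  induction l with
  | nil => rfl
  | cons a p ih =>
    have ha : a ≠ x := fun hax => h (by simp [hax])
    have hp : x ∉ p := fun hxp => h (by simp [hxp])
    simp [pvAfter, ha, ih hp]

theorem pvAfter_append_self (x : Char) (pre : List Char) (h : x ∉ pre) :
    pvAfter x (pre ++ [x]) = [] := by
  induction pre with
  | nil => simp [pvAfter]
  | cons a p ih =>
    have ha : a ≠ x := fun hax => h (by simp [hax])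
    have hp : x ∉ p := fun hxp => h (by simp [hxp])
    simp only [List.cons_append, pvAfter, if_neg ha]
    exact ih hp

theorem pvMain (cs : List Char) :
    ∀ (pre : List Char) (vl : List String), ']' ∉ pre →
      (cs.foldl pvStepA (vl, decide ('[' ∈ pre), pvAfter '[' pre)).1
        = vl ++ pvBcore (pre ++ cs) := by
  induction cs with
  | nil =>
    intro pre vl hpre
    have : pvSplit ']' pre = [pre] := by
      rw [show pre = pre ++ ([] : List Char) from by simp, pvConsFst_split ']' pre [] hpre]
      rfl
    simp [pvBcore, this]
  | cons c rest ih =>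
    intro pre vl hpre
    by_cases hc : c = ']'
    · subst hc
      have hstep : pvStepA (vl, decide ('[' ∈ pre), pvAfter '[' pre) ']'
          = (vl ++ [String.ofList (PySem.Chars.strip (pvAfter '[' pre))], false, ([] : List Char)) := by
        simp [pvStepA]
      rw [List.foldl_cons, hstep]
      have h2 := ih [] (vl ++ [String.ofList (PySem.Chars.strip (pvAfter '[' pre))]) (by simp)
      simp only [pvAfter, List.nil_append, decide_eq_false (by simp : ¬ '[' ∈ ([] : List Char))] at h2
      rw [h2]
      have hsplit : pvSplit ']' (pre ++ ']' :: rest) = pre :: pvSplit ']' rest := by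
        rw [pvConsFst_split ']' pre (']' :: rest) hpre]
        simp only [pvSplit]
        cases hs : pvSplit ']' rest with
        | nil => exact absurd hs (pvSplit_ne_nil ']' rest)
        | cons a t => simp [pvConsFst]
      have hA : String.ofList (PySem.Chars.strip (pvAfter '[' pre)) = pvFA pre := by
        unfold pvFA
        by_cases hm : '[' ∈ pre
        · rw [if_pos hm]
        · rw [if_neg hm, pvAfter_not_mem '[' pre hm]; rfl
      simp only [pvBcore, hsplit, List.dropLast_cons_of_ne_nil (pvSplit_ne_nil ']' rest), List.map_cons, hA]
      simp
    · have hstep : pvStepA (vl, decide ('[' ∈ pre), pvAfter '[' pre) c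
          = (vl, decide ('[' ∈ pre ++ [c]), pvAfter '[' (pre ++ [c])) := by
        by_cases hm : '[' ∈ pre
        · have hrec : pvAfter '[' pre ++ [c] = pvAfter '[' (pre ++ [c]) := (pvAfter_append_mem '[' pre c hm).symm
          simp [pvStepA, hc, hm, hrec, List.mem_append]
        · have h2 : pvAfter '[' pre = [] := pvAfter_not_mem '[' pre hm
          by_cases hcb : c = '['
          · subst hcb
            simp [pvStepA, hc, hm, h2, pvAfter_append_self '[' pre hm, List.mem_append]
          · have hnm : '[' ∉ pre ++ [c] := by
              intro h'
              rcases List.mem_append.mp h' with h'' | h''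
              · exact hm h''
              · exact hcb (List.mem_singleton.mp h'').symm
            simp [pvStepA, hc, hm, hcb, h2, pvAfter_not_mem '[' _ hnm, hnm]
      rw [List.foldl_cons, hstep, ih (pre ++ [c]) vl (by simp [List.mem_append]; exact ⟨fun h' => hpre h', fun h' => hc h'.symm⟩)]
      simp

-- ===== VERDICT (by name: the statement is the Claim_ definition above) =====
theorem get_list_varfull_spec : Claim_equal_get_list_varfull := by
  intro s _
  show get_list_varfull s = get_list_varfull_alt s
  unfold get_list_varfull
  rw [pvAlt_eq_core]
  have := pvMain s.toList [] [] (by simp)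
  simpa [pvAfter] using this
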